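-- pv_equiv track=rewrite | github.com/ZyerTCoder/aoc2021 | 16.py | decode_id4
-- ===== SOURCE A (Python) =====
-- def decode_id4(b, p):
--     out = ""
--     done = False
--     while not done:
--         if b[p] == "0":
--             done = True
--         out += b[p+1:p+5]
--         p += 5
--     return int(out, 2), p
-- ===== SOURCE B (Python) =====
-- def decode_id4(b, p):
--     # Two-pass: first locate the terminating '0'-group, then extract the payloads.
--     end = p
--     while b[end] != "0":
--         end += 5
--     end += 5
--     bits = "".join(b[i + 1:i + 5] for i in range(p, end, 5))
--     return int(bits, 2), end
-- ===== Notes on version B (the rewrite author's own statement) =====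
-- stated objective: alternative
-- what changed: Replaces A's single interleaved test-and-accumulate while-loop (done flag, string accumulator grown inside the loop) by a two-pass structure: a first scan only locates the terminating '0'-group and the end pointer, a second comprehension pass extracts and joins the 4-bit payloads.
import Mathlib
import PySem

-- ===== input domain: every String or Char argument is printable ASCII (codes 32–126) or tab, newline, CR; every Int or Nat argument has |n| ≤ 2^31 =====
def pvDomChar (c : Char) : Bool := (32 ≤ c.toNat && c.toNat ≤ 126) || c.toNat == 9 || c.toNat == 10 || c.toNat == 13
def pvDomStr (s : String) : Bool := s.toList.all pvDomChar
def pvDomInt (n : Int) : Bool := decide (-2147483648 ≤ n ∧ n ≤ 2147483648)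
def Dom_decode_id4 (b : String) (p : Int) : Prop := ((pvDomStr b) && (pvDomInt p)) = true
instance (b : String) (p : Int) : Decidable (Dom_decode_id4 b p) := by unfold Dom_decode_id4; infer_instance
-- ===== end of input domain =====

-- B replaces A's interleaved test-and-accumulate loop by a two-pass locate-then-extract
-- structure (same cost); equivalence is proved on the inputs where A returns normally
-- (scan in range, terminating '0'-group reached, collected window parses in base 2).


-- int(out, 2); none = ValueError, which Pre_ excludes (there ofCharsBase? is some)
def pvBin (out : List Char) : Int := (PySem.Int.ofCharsBase? out 2).getD 0

-- ===== PORT A =====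
-- A's while-loop: test b[p], accumulate out += b[p+1:p+5], p += 5; fuel bounds the
-- iterations (under Pre_ the loop terminates well within b.length + 1 iterations).
def decodeA_loop (l : List Char) (p : Int) (out : List Char) (fuel : Nat) : List Char × Int :=
  match fuel with
  | 0 => (out, p)  -- unreachable under Pre_
  | fuel + 1 =>
    let out' := out ++ PySem.List.slice l (some (p + 1)) (some (p + 5))
    if PySem.List.pyGet? l p = some '0' then (out', p + 5)
    else decodeA_loop l (p + 5) out' fuel

def decode_id4 (b : String) (p : Int) : Int × Int :=
  let r := decodeA_loop b.toList p [] (b.toList.length + 1)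
  (pvBin r.1, r.2)

-- ===== PORT B =====
-- pass 1 of Source B: `while b[end] != "0": end += 5`
def findEnd (l : List Char) (e : Int) (fuel : Nat) : Int :=
  match fuel with
  | 0 => e  -- unreachable under Pre_
  | fuel + 1 =>
    if PySem.List.pyGet? l e ≠ some '0' then findEnd l (e + 5) fuel else e

def decode_id4_alt (b : String) (p : Int) : Int × Int :=
  let l := b.toList
  let e := findEnd l p (l.length + 1) + 5
  let bits := (PySem.List.pyRange p e 5).foldl
    (fun acc i => acc ++ PySem.List.slice l (some (i + 1)) (some (i + 5))) []
  (pvBin bits, e)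

-- ===== PRECONDITION & SPEC =====
-- Pre_ is exactly the inputs on which the Python A returns normally: the 5-step scan from p
-- starts in range and reaches a first terminating '0'-group (so no IndexError), and the
-- characters collected up to it form a valid base-2 int literal (so no ValueError).
def Pre_decode_id4 (b : String) (p : Int) : Prop :=
  -(b.toList.length : Int) ≤ p ∧
  (∃ k < b.toList.length + 1,
    PySem.List.pyGet? b.toList (p + 5 * (k : Int)) = some '0' ∧
    (∀ j < k, PySem.List.pyGet? b.toList (p + 5 * (j : Int)) ≠ some '0') ∧
    PySem.Int.ofCharsBase?
      ((List.range (k + 1)).flatMap fun j =>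
        PySem.List.slice b.toList (some (p + 5 * (j : Int) + 1)) (some (p + 5 * (j : Int) + 5)))
      2 ≠ none)
instance (b : String) (p : Int) : Decidable (Pre_decode_id4 b p) := by
  unfold Pre_decode_id4; infer_instance

def pvWitness_decode_id4 : String × Int := ("01111", 0)

def Spec_decode_id4 (b : String) (p : Int) (out : Int × Int) : Prop := out = decode_id4_alt b p
instance (b : String) (p : Int) (out : Int × Int) : Decidable (Spec_decode_id4 b p out) := by
  unfold Spec_decode_id4; infer_instance

-- ===== CLAIM (what is proved, stated in full; the proofs are below) =====
def Claim_equal_decode_id4 : Prop := ∀ (b : String) (p : Int), Dom_decode_id4 b p → Pre_decode_id4 b p → Spec_decode_id4 b p (decode_id4 b p)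

-- ===== LEMMAS AND PROOFS =====

lemma pyRange5_nil (a b : Int) (h : b ≤ a) : PySem.List.pyRange a b 5 = [] := by
  rw [PySem.List.pyRange_of_pos a b (by norm_num), if_neg (by omega)]
  simp

lemma pyRange5_cons (a : Int) (m : Nat) :
    PySem.List.pyRange a (a + 5 * ((m : Int) + 1)) 5
      = a :: PySem.List.pyRange (a + 5) (a + 5 * ((m : Int) + 1)) 5 := by
  rw [PySem.List.pyRange_of_pos _ _ (by norm_num), PySem.List.pyRange_of_pos _ _ (by norm_num)]
  rw [if_pos (by omega)]
  have h1 : ((a + 5 * ((m : Int) + 1) - a + 5 - 1) / 5).toNat = m + 1 := by omega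
  rw [h1, List.range_succ_eq_map, List.map_cons, List.map_map]
  rcases Nat.eq_zero_or_pos m with hm | hm
  · subst hm
    rw [if_neg (by omega)]
    norm_num
  · rw [if_pos (by omega)]
    have h2 : ((a + 5 * ((m : Int) + 1) - (a + 5) + 5 - 1) / 5).toNat = m := by omega
    rw [h2]
    have hfun : ((fun k : Nat => a + 5 * (k : Int)) ∘ Nat.succ)
        = fun k : Nat => a + 5 + 5 * (k : Int) := by
      funext k
      simp only [Function.comp_apply]
      push_cast
      ring
    rw [hfun]
    norm_num

-- findEnd only ever advances in steps of 5
lemma findEnd_shape (l : List Char) : ∀ (fuel : Nat) (e : Int),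
    ∃ m : Nat, findEnd l e fuel = e + 5 * m := by
  intro fuel
  induction fuel with
  | zero => exact fun e => ⟨0, by simp [findEnd]⟩
  | succ fuel ih =>
    intro e
    by_cases h : PySem.List.pyGet? l e = some '0'
    · exact ⟨0, by simp [findEnd, h]⟩
    · obtain ⟨m, hm⟩ := ih (e + 5)
      exact ⟨m + 1, by simp only [findEnd, if_pos h]; rw [hm]; push_cast; ring⟩

-- Main invariant: whenever a terminating '0'-group is reachable within the fuel,
-- A's loop returns B's locate-then-extract value.
lemma loop_eq (l : List Char) : ∀ (fuel : Nat) (p : Int) (out : List Char),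
    (∃ k : Nat, k < fuel ∧ PySem.List.pyGet? l (p + 5 * k) = some '0') →
    decodeA_loop l p out fuel =
      (out ++ (PySem.List.pyRange p (findEnd l p fuel + 5) 5).flatMap
          (fun i => PySem.List.slice l (some (i + 1)) (some (i + 5))),
       findEnd l p fuel + 5) := by
  intro fuel
  induction fuel with
  | zero => rintro p out ⟨k, hk, -⟩; omega
  | succ fuel ih =>
    rintro p out ⟨k, hk, hget⟩
    by_cases h : PySem.List.pyGet? l p = some '0'
    · simp only [decodeA_loop, findEnd, if_pos h, if_neg (not_not_intro h)]
      have h0 : p + 5 = p + 5 * (((0 : Nat) : Int) + 1) := by push_cast; ring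
      rw [h0, pyRange5_cons p 0]
      rw [pyRange5_nil _ _ (by omega)]
      simp
    · have hk0 : k ≠ 0 := by rintro rfl; simp at hget; exact h (by simpa using hget)
      have hget' : PySem.List.pyGet? l (p + 5 + 5 * ((k - 1 : Nat) : Int)) = some '0' := by
        have : p + 5 + 5 * ((k - 1 : Nat) : Int) = p + 5 * k := by
          have : (1 : Nat) ≤ k := Nat.one_le_iff_ne_zero.mpr hk0
          push_cast [Nat.cast_sub this]
          ring
        rw [this]; exact hget
      have hrec := ih (p + 5) (out ++ PySem.List.slice l (some (p + 1)) (some (p + 5)))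
        ⟨k - 1, by omega, hget'⟩
      simp only [decodeA_loop, findEnd, if_neg h, if_pos h]
      rw [hrec]
      obtain ⟨m, hm⟩ := findEnd_shape l fuel (p + 5)
      have hE : findEnd l (p + 5) fuel + 5 = p + 5 * (((m + 1 : Nat) : Int) + 1) := by
        rw [hm]; push_cast; ring
      rw [hE, pyRange5_cons p (m + 1), List.flatMap_cons, List.append_assoc]

theorem decode_id4_spec_aux (b : String) (p : Int) (hpre : Pre_decode_id4 b p) :
    decode_id4 b p = decode_id4_alt b p := by
  obtain ⟨-, k, hk, hget, -⟩ := hpre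
  unfold decode_id4 decode_id4_alt
  rw [loop_eq b.toList (b.toList.length + 1) p [] ⟨k, hk, hget⟩]
  simp only [PySem.List.foldl_append_eq_flatMap, List.nil_append]

-- ===== VERDICT (by name: the statement is the Claim_ definition above) =====
theorem decode_id4_spec : Claim_equal_decode_id4 := by
  intro b p _ hpre
  unfold Spec_decode_id4
  exact decode_id4_spec_aux b p hpre
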